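-- pv_equiv track=rewrite | github.com/Tarki1151/futbolveri | clients/api_football.py | get_current_season_year
-- ===== SOURCE A (Python) =====
-- from typing import Dict, Generator, List, Optional
--
-- def get_current_season_year(league_item: Dict) -> Optional[int]:
--     seasons = league_item.get("seasons") or []
--     for s in seasons:
--         if s.get("current"):
--             return s.get("year")
--     # fallback: latest year
--     if seasons:
--         years = [s.get("year") for s in seasons if s.get("year")]
--         return max(years) if years else None
--     return None
-- ===== SOURCE B (Python) =====
-- def get_current_season_year(league_item):
--     # Single reversed pass: leftmost current season wins because it is processed
--     # last and overwrites; otherwise the same slot accumulates the max truthy year.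
--     val = None
--     have_current = False
--     for s in reversed(league_item.get("seasons") or []):
--         if s.get("current"):
--             have_current = True
--             val = s.get("year")
--         elif not have_current:
--             y = s.get("year")
--             if y and (val is None or y >= val):
--                 val = y
--     return val
-- ===== Notes on version B (the rewrite author's own statement) =====
-- stated objective: alternative
-- what changed: A scans forward with an early return for the first current season and, failing that, builds a filtered list of truthy years and maxes it in a second pass; B makes one reversed pass keeping a single result slot: a current season always overwrites it (so the first current in original order wins, being processed last) and, until a current season is seen, the slot accumulates the running maximum of truthy years.
import Mathlib
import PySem

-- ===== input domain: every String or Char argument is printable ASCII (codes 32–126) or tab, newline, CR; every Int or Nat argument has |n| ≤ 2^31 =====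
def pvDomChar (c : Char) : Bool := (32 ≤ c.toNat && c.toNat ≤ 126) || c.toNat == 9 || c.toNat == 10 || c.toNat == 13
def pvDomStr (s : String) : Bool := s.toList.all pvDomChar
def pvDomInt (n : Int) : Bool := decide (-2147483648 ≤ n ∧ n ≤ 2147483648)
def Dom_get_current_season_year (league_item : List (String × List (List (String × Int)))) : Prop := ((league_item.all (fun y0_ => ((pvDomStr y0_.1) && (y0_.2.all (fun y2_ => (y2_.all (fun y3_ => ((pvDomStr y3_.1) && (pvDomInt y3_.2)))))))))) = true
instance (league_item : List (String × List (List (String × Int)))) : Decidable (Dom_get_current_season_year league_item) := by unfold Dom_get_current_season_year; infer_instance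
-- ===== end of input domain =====

-- B replaces A's forward early-return scan plus second-pass filtered max by ONE reversed
-- pass with a single overwritten result slot; same cost, genuinely different traversal.

-- shared Python primitives: s.get(k) on an assoc list = first match; truthiness of an int
def pvTruthyOpt (o : Option Int) : Bool :=
  match o with | some v => v != 0 | none => false

-- "s.get('year') if it is truthy, else nothing" (the filter in A's comprehension / B's `if y`)
def pvYear (s : List (String × Int)) : Option Int :=
  match List.lookup "year" s with
  | some y => if y != 0 then some y else none
  | none => none

-- ===== PORT A =====
-- the early-return for-loop: some r = "return r", none = fell through
def pvFindCurrentA : List (List (String × Int)) → Option (Option Int)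
  | [] => none
  | s :: rest =>
    if pvTruthyOpt (List.lookup "current" s) then some (List.lookup "year" s)
    else pvFindCurrentA rest

def get_current_season_year (league_item : List (String × List (List (String × Int)))) : Option Int :=
  let seasons := match List.lookup "seasons" league_item with
    | some v => if v.isEmpty then [] else v
    | none => []
  match pvFindCurrentA seasons with
  | some r => r
  | none =>
    if !seasons.isEmpty then
      let years := seasons.filterMap pvYear
      if !years.isEmpty then PySem.List.max? years (fun x => x) else none
    else none

-- ===== PORT B =====
-- one step of B's reversed loop; state = (have_current, val)
def pvStepR (st : Bool × Option Int) (s : List (String × Int)) : Bool × Option Int :=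
  if pvTruthyOpt (List.lookup "current" s) then (true, List.lookup "year" s)
  else if st.1 then st
  else match pvYear s with
    | some y =>
      (false, match st.2 with
              | none => some y
              | some v => if y ≥ v then some y else some v)
    | none => st

def get_current_season_year_alt (league_item : List (String × List (List (String × Int)))) : Option Int :=
  let seasons := match List.lookup "seasons" league_item with
    | some v => if v.isEmpty then [] else v
    | none => []
  (seasons.reverse.foldl pvStepR (false, none)).2

-- ===== PRECONDITION & SPEC =====
def Spec_get_current_season_year (league_item : List (String × List (List (String × Int)))) (out : Option Int) : Prop := out = get_current_season_year_alt league_item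
instance (league_item : List (String × List (List (String × Int)))) (out : Option Int) : Decidable (Spec_get_current_season_year league_item out) := by unfold Spec_get_current_season_year; infer_instance

-- ===== CLAIM =====
def Claim_equal_get_current_season_year : Prop := ∀ (league_item : List (String × List (List (String × Int)))), Dom_get_current_season_year league_item → Spec_get_current_season_year league_item (get_current_season_year league_item)

-- ===== LEMMAS AND PROOFS =====

-- the running maximum B's slot computes in the no-current case, as a foldr
def pvMaxR : List Int → Option Int
  | [] => none
  | y :: t => match pvMaxR t with
    | none => some y
    | some v => if y ≥ v then some y else some v

theorem pvMaxR_cons (t : List Int) : ∀ (y : Int), pvMaxR (y :: t) = some (t.foldl max y) := by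
  induction t with
  | nil => intro y; rfl
  | cons z t ih =>
    intro y
    show (match pvMaxR (z :: t) with
          | none => some y
          | some v => if y ≥ v then some y else some v) = some (List.foldl max y (z :: t))
    rw [ih z, List.foldl_cons, List.foldl_assoc]
    by_cases h1 : List.foldl max z t ≤ y
    · simp [h1]
    · simp [h1, max_eq_right (le_of_not_ge h1)]

theorem pvMaxR_max? (ys : List Int) :
    pvMaxR ys = PySem.List.max? ys (fun x => x) := by
  cases ys with
  | nil => rfl
  | cons y t => rw [PySem.List.max?_id_cons, pvMaxR_cons]

-- characterisation of B's reversed fold in terms of A's two phases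
theorem foldR_run (seasons : List (List (String × Int))) :
    seasons.reverse.foldl pvStepR (false, none) =
      (match pvFindCurrentA seasons with
       | some r => (true, r)
       | none => (false, pvMaxR (seasons.filterMap pvYear))) := by
  rw [List.foldl_reverse]
  induction seasons with
  | nil => rfl
  | cons s rest ih =>
    simp only [List.foldr_cons, ih]
    by_cases hc : pvTruthyOpt (List.lookup "current" s) = true
    · simp [pvStepR, hc, pvFindCurrentA]
    · cases hf : pvFindCurrentA rest with
      | some r => simp [pvStepR, hc, pvFindCurrentA, hf]
      | none =>
        cases hy : pvYear s with
        | none => simp [pvStepR, hc, pvFindCurrentA, hf, hy]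
        | some y =>
          have hstep : pvStepR (false, pvMaxR (List.filterMap pvYear rest)) s
              = (false, pvMaxR (y :: List.filterMap pvYear rest)) := by
            unfold pvStepR
            rw [if_neg hc, hy]
            rfl
          simp [pvFindCurrentA, hc, hf, hstep, List.filterMap_cons, hy]

-- ===== VERDICT =====
theorem get_current_season_year_spec : Claim_equal_get_current_season_year := by
  intro league_item _
  unfold Spec_get_current_season_year get_current_season_year get_current_season_year_alt
  dsimp only
  generalize (match List.lookup "seasons" league_item with
     | some v => if v.isEmpty then [] else v
     | none => [] : List (List (String × Int))) = seasons
  rw [foldR_run seasons]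
  cases hf : pvFindCurrentA seasons with
  | some r => simp
  | none =>
    by_cases h0 : seasons = []
    · simp [h0, pvMaxR]
    · by_cases hy : seasons.filterMap pvYear = []
      · simp [h0, hy, pvMaxR]
      · simp [h0, hy, pvMaxR_max?]
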